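-- pv_equiv track=rewrite | github.com/ldct/cp | GCJ/2022/quals/D/D.py | ans_dfs_oneval
-- ===== SOURCE A (Python) =====
-- from collections import defaultdict
--
-- def ans_dfs_oneval(F, P):
--     children = defaultdict(list)
--
--     N = len(F)
--     F = [0] + F
--     P = [-1] + P
--
--     for i, p in enumerate(P):
--         if p == -1: continue
--         children[p] += [i]
--
--     def dfs(u):
--         if len(children[u]) == 0: return (F[u], 0)
--
--         cv = []
--         fixed = 0
--
--         for v in children[u]:
--             e, f = dfs(v)
--             fixed += f
--             cv += [e]
--
--         cv.sort()
--         cv[0] = max(cv[0], F[u])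
--
--         return (cv[0], fixed + sum(cv[1:]))
--
--     return sum(dfs(0))
-- ===== SOURCE B (Python) =====
-- def ans_dfs_oneval(F, P):
--     n = len(F)
--     fv = [0] + F
--     kids = [[] for _ in range(n + 1)]
--     for i, p in enumerate(P, 1):
--         if 0 <= p <= n:
--             kids[p].append(i)
--
--     # bottom-up dataflow: repeatedly resolve every node whose children are all
--     # resolved (leaves first), until the root's (e, total) pair is known
--     val = [None] * (n + 1)
--     for _ in range(n + 1):
--         if val[0] is not None:
--             break
--         cur = val
--         val = list(cur)
--         for u in range(n + 1):
--             if cur[u] is None and all(cur[v] is not None for v in kids[u]):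
--                 if kids[u]:
--                     m = min(cur[v][0] for v in kids[u])
--                     s = sum(cur[v][0] + cur[v][1] for v in kids[u])
--                     val[u] = (max(m, fv[u]), s - m)
--                 else:
--                     val[u] = (fv[u], 0)
--     e, f = val[0]
--     return e + f
-- ===== Notes on version B (the rewrite author's own statement) =====
-- stated objective: alternative
-- what changed: B replaces the top-down recursive DFS by a bottom-up dataflow iteration: a table of per-node (e, subtree-total) pairs is repeatedly relaxed, each round resolving every node whose children are all already resolved (leaves first), stopping when the root is resolved; no recursion and no sort (a running min over resolved child values instead).
-- outside the precondition, e.g. on ans_dfs_oneval([], [5]): A returns 0, B returns 0; on ans_dfs_oneval([1], [5, 1]): A returns 0, B raises IndexError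
import Mathlib
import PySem

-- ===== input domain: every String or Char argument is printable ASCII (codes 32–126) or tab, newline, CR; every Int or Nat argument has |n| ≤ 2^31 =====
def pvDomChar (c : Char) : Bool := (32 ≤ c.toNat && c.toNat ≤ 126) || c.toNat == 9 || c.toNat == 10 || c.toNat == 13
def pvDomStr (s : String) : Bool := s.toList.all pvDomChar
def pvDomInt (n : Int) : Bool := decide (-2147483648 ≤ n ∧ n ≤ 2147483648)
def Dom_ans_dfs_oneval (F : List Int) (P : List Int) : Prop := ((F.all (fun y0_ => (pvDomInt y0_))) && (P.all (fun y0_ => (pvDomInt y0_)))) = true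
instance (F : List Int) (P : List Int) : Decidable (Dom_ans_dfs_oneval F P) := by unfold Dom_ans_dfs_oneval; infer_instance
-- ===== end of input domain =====

-- B replaces the top-down recursive DFS by a bottom-up dataflow iteration over a table of
-- per-node (e, subtree-total) pairs (no recursion, no sort); same return values.

-- ===== PORT A =====
-- children = defaultdict(list); for i, p in enumerate([-1] + P): if p == -1: continue; children[p] += [i]
def pvAChildren (P1 : List Int) : PySem.Dict Int (List Int) :=
  (PySem.List.enumerate P1 0).foldl
    (fun d ip => if ip.2 = -1 then d else d.modify ip.2 [] (fun l => l ++ [ip.1]))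
    PySem.Dict.empty

-- dfs(u); fuel (a totality guard only: on inputs admitted by Pre_ the recursion depth is < fuel)
def pvAdfs (ch : PySem.Dict Int (List Int)) (F1 : List Int) : Nat → Int → Int × Int
  | 0, _ => (0, 0)
  | n+1, u =>
    let cs := ch.getD u []
    if cs.length = 0 then ((PySem.List.pyGet? F1 u).getD 0, 0)
    else
      -- for v in children[u]: e, f = dfs(v); fixed += f; cv += [e]
      let st := cs.foldl (fun (acc : Int × List Int) v =>
        let ef := pvAdfs ch F1 n v
        (acc.1 + ef.2, acc.2 ++ [ef.1])) (0, [])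
      -- cv.sort(); cv[0] = max(cv[0], F[u]); return (cv[0], fixed + sum(cv[1:]))
      let cv := PySem.List.sorted st.2 (fun x => x) false
      let cv2 := cv.set 0 (max ((PySem.List.pyGet? cv 0).getD 0) ((PySem.List.pyGet? F1 u).getD 0))
      (((PySem.List.pyGet? cv2 0).getD 0), st.1 + (cv2.drop 1).sum)

def ans_dfs_oneval (F : List Int) (P : List Int) : Int :=
  let F1 := (0 : Int) :: F
  let P1 := (-1 : Int) :: P
  let ch := pvAChildren P1
  let r := pvAdfs ch F1 (P.length + 2) 0
  r.1 + r.2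

-- ===== PORT B =====
-- kids = [[] for _ in range(n+1)]; for i, p in enumerate(P, 1): if 0 <= p <= n: kids[p].append(i)
def pvBKids (n : Nat) (P : List Int) : List (List Int) :=
  (PySem.List.enumerate P 1).foldl
    (fun ks ip => if 0 ≤ ip.2 ∧ ip.2 ≤ (n : Int)
      then ks.set ip.2.toNat (ks.getD ip.2.toNat [] ++ [ip.1]) else ks)
    (List.replicate (n+1) [])

-- the pair written into the table for node u once all of kids[u] are resolved in cur
-- (val[u] = (fv[u], 0) for a leaf; else min / sum over the children's resolved pairs);
-- indices are the nonnegative ints 0..n, so plain getD is exact for Python's cur[u] / cur[v]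
def pvBNew (fv : List Int) (cur : List (Option (Int × Int))) (cs : List Int) (u : Nat) : Int × Int :=
  match cs with
  | [] => (fv.getD u 0, 0)
  | c :: rest =>
    let g := fun (v : Int) => (cur.getD v.toNat none).getD (0, 0)
    let m := rest.foldl (fun b v => min b (g v).1) (g c).1
    let s := (c :: rest).foldl (fun a v => a + (g v).1 + (g v).2) 0
    (max m (fv.getD u 0), s - m)

-- one round: for u in range(n+1): if cur[u] is None and all children resolved: val[u] = …
def pvBStep (n : Nat) (kids : List (List Int)) (fv : List Int)
    (cur : List (Option (Int × Int))) : List (Option (Int × Int)) :=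
  (List.range (n+1)).foldl
    (fun val u =>
      if (cur.getD u none).isNone && (kids.getD u []).all (fun v => (cur.getD v.toNat none).isSome) then
        val.set u (some (pvBNew fv cur (kids.getD u []) u))
      else val)
    cur

-- for _ in range(n+1): if val[0] is not None: break; val = one round over the previous table
def pvBRounds (n : Nat) (kids : List (List Int)) (fv : List Int) :
    Nat → List (Option (Int × Int)) → List (Option (Int × Int))
  | 0, val => val
  | k+1, val => if (val.getD 0 none).isSome then val
      else pvBRounds n kids fv k (pvBStep n kids fv val)

def ans_dfs_oneval_alt (F : List Int) (P : List Int) : Int :=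
  let n := F.length
  let fv := (0 : Int) :: F
  let kids := pvBKids n P
  let val := pvBRounds n kids fv (n+1) (List.replicate (n+1) none)
  match val.getD 0 none with
  | some p => p.1 + p.2   -- e, f = val[0]; return e + f
  | none => 0             -- unreachable under Pre_ (the root is always resolved); totality guard

-- ===== PRECONDITION & SPEC =====
-- Pre_ excludes inputs where P lists more nodes than F has values: such extra nodes have no
-- fitness value — A raises IndexError whenever one is reachable from the root, and B's
-- table-driven version indexes its value table out of range on them; the simple length bound
-- also drops some inputs whose extra nodes are unreachable (there A returns and B either
-- returns the same value or raises).
def Pre_ans_dfs_oneval (F : List Int) (P : List Int) : Prop := P.length ≤ F.length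
instance (F : List Int) (P : List Int) : Decidable (Pre_ans_dfs_oneval F P) := by unfold Pre_ans_dfs_oneval; infer_instance
def pvWitness_ans_dfs_oneval : List Int × List Int := ([2, 3, 5], [0, 1, 1])

def Spec_ans_dfs_oneval (F : List Int) (P : List Int) (out : Int) : Prop := out = ans_dfs_oneval_alt F P
instance (F : List Int) (P : List Int) (out : Int) : Decidable (Spec_ans_dfs_oneval F P out) := by unfold Spec_ans_dfs_oneval; infer_instance

-- ===== CLAIM (what is proved, stated in full; the proofs are below) =====
def Claim_equal_ans_dfs_oneval : Prop := ∀ (F : List Int) (P : List Int), Dom_ans_dfs_oneval F P → Pre_ans_dfs_oneval F P → Spec_ans_dfs_oneval F P (ans_dfs_oneval F P)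

-- ===== LEMMAS AND PROOFS =====

-- the list of children of u determined directly by P (1-based indices i with P[i-1] = u)
def pvOcc (P : List Int) (u : Int) : List Int :=
  ((PySem.List.enumerate P 1).filter (fun ip => ip.2 == u)).map (·.1)

theorem mem_pvOcc_iff {P : List Int} {u v : Int} :
    v ∈ pvOcc P u ↔ ∃ (k : Nat) (h : k < P.length), v = (k : Int) + 1 ∧ P[k] = u := by
  unfold pvOcc
  simp only [List.mem_map, List.mem_filter]
  constructor
  · rintro ⟨ip, ⟨hmem, hu⟩, rfl⟩
    rw [PySem.List.mem_enumerate_iff] at hmem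
    obtain ⟨k, hk, rfl⟩ := hmem
    exact ⟨k, hk, by push_cast; ring, by simpa using hu⟩
  · rintro ⟨k, hk, rfl, hu⟩
    refine ⟨(1 + (k : Int), P[k]), ⟨?_, by simpa using hu⟩, by push_cast; ring⟩
    rw [PySem.List.mem_enumerate_iff]
    exact ⟨k, hk, rfl⟩

theorem pvOcc_mem {P : List Int} {u v : Int} (h : v ∈ pvOcc P u) :
    1 ≤ v ∧ v ≤ (P.length : Int) := by
  obtain ⟨k, hk, rfl, _⟩ := mem_pvOcc_iff.mp h
  constructor <;> [omega; exact_mod_cast by omega]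

-- the parent of v is unique: membership in pvOcc P a determines a
theorem pvOcc_parent_unique {P : List Int} {a b v : Int}
    (ha : v ∈ pvOcc P a) (hb : v ∈ pvOcc P b) : a = b := by
  obtain ⟨k, hk, hv, hpa⟩ := mem_pvOcc_iff.mp ha
  obtain ⟨k', hk', hv', hpb⟩ := mem_pvOcc_iff.mp hb
  have : k = k' := by omega
  subst this
  rw [← hpa, ← hpb]

-- A-side adjacency characterisation
theorem pvAChildren_fold (l : List (Int × Int)) (u : Int) (hu : u ≠ -1) :
    ∀ d : PySem.Dict Int (List Int),
    (l.foldl (fun d ip => if ip.2 = -1 then d else d.modify ip.2 [] (fun l => l ++ [ip.1])) d).getD u []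
      = d.getD u [] ++ (l.filter (fun ip => ip.2 == u)).map (·.1) := by
  induction l with
  | nil => intro d; simp
  | cons ip rest ih =>
    intro d
    rw [List.foldl_cons]
    by_cases h1 : ip.2 = -1
    · have hbu : (ip.2 == u) = false := by
        simp only [h1]; simpa using fun h => hu h.symm
      rw [if_pos h1, ih d]
      simp [hbu]
    · rw [if_neg h1, ih]
      by_cases h2 : ip.2 = u
      · subst h2
        rw [PySem.Dict.getD_modify_self]
        simp
      · rw [PySem.Dict.getD_modify_of_ne d [] _ (fun h => h2 h.symm)]
        have hbu : (ip.2 == u) = false := by simpa using h2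
        simp [hbu]

theorem pvAChildren_getD (P : List Int) (u : Int) (hu : 0 ≤ u) :
    (pvAChildren ((-1 : Int) :: P)).getD u [] = pvOcc P u := by
  have hu' : u ≠ -1 := by omega
  unfold pvAChildren pvOcc
  rw [PySem.List.enumerate_cons, List.foldl_cons, if_pos rfl]
  rw [pvAChildren_fold _ u hu']
  simp

-- B-side adjacency characterisation
theorem pvBKids_fold (n : Nat) (l : List (Int × Int)) (u : Int) (hu : 0 ≤ u) (hun : u ≤ (n : Int)) :
    ∀ ks : List (List Int), ks.length = n + 1 →
    ((l.foldl (fun ks ip => if 0 ≤ ip.2 ∧ ip.2 ≤ (n : Int)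
        then ks.set ip.2.toNat (ks.getD ip.2.toNat [] ++ [ip.1]) else ks) ks).getD u.toNat []
      = ks.getD u.toNat [] ++ (l.filter (fun ip => ip.2 == u)).map (·.1)) := by
  induction l with
  | nil => intro ks _; simp
  | cons ip rest ih =>
    intro ks hlen
    rw [List.foldl_cons]
    by_cases hg : 0 ≤ ip.2 ∧ ip.2 ≤ (n : Int)
    · rw [if_pos hg, ih _ (by simp [hlen])]
      by_cases h2 : ip.2 = u
      · subst h2
        have hlt : ip.2.toNat < ks.length := by omega
        rw [List.getD_eq_getElem?_getD, List.getElem?_set_self hlt, Option.getD_some]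
        simp [List.append_assoc]
      · have hne : ip.2.toNat ≠ u.toNat := by omega
        rw [List.getD_eq_getElem?_getD, List.getElem?_set_ne hne, ← List.getD_eq_getElem?_getD]
        have hbu : (ip.2 == u) = false := by simpa using h2
        simp [hbu]
    · rw [if_neg hg, ih _ hlen]
      have hbu : (ip.2 == u) = false := by
        have h2 : ip.2 ≠ u := fun h => hg (h ▸ ⟨hu, hun⟩)
        simpa using h2
      simp [hbu]

theorem pvBKids_getD (n : Nat) (P : List Int) (u : Nat) (hu : u ≤ n) :
    (pvBKids n P).getD u [] = pvOcc P (u : Int) := by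
  have h := pvBKids_fold n (PySem.List.enumerate P 1) (u : Int) (by positivity)
    (by exact_mod_cast hu) (List.replicate (n+1) []) (by simp)
  unfold pvBKids pvOcc
  rw [show ((u : Int)).toNat = u by omega] at h
  rw [h]
  simp [List.getD_eq_getElem?_getD, List.getElem?_replicate]
  split <;> rfl

-- the A-side loop: fixed = sum of f's, cv = list of e's in order
theorem pvFoldA_spec (e f : Int → Int) (cs : List Int) :
    ∀ (fx : Int) (es0 : List Int),
    cs.foldl (fun (acc : Int × List Int) v => (acc.1 + f v, acc.2 ++ [e v])) (fx, es0)
      = (fx + (cs.map f).sum, es0 ++ cs.map e) := by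
  induction cs with
  | nil => intro fx es0; simp
  | cons c rest ih =>
    intro fx es0
    rw [List.foldl_cons, ih]
    simp only [List.map_cons, List.sum_cons, Prod.mk.injEq]
    exact ⟨by ring, by simp⟩

-- the B-side sum loop: total of e v + f v over the children
theorem pvFoldB_sum (e f : Int → Int) (cs : List Int) :
    ∀ a : Int, cs.foldl (fun a v => a + e v + f v) a = a + (cs.map e).sum + (cs.map f).sum := by
  induction cs with
  | nil => intro a; simp
  | cons c rest ih =>
    intro a
    rw [List.foldl_cons, ih]
    simp only [List.map_cons, List.sum_cons]
    ring

-- the running minimum is a lower bound attained in the list (or the start)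
theorem pvFoldMin_spec (e : Int → Int) (cs : List Int) :
    ∀ b : Int, (cs.foldl (fun b v => min b (e v)) b = b ∨
        cs.foldl (fun b v => min b (e v)) b ∈ cs.map e) ∧
      cs.foldl (fun b v => min b (e v)) b ≤ b ∧
      (∀ v ∈ cs, cs.foldl (fun b v => min b (e v)) b ≤ e v) := by
  induction cs with
  | nil => intro b; simp
  | cons c rest ih =>
    intro b
    rw [List.foldl_cons]
    obtain ⟨hmem, hle, hall⟩ := ih (min b (e c))
    refine ⟨?_, ?_, ?_⟩
    · rcases hmem with h | h
      · rw [h]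
        rcases min_cases b (e c) with ⟨h', _⟩ | ⟨h', _⟩
        · left; exact h'
        · right; rw [h']; simp
      · right; rw [List.map_cons]; exact List.mem_cons_of_mem _ h
    · exact le_trans hle (min_le_left _ _)
    · intro v hv
      rcases List.mem_cons.mp hv with rfl | hv
      · exact le_trans hle (min_le_right _ _)
      · exact hall v hv

-- head of the sorted list = the running minimum started at the head element
theorem pvSortedHead_eq (e : Int → Int) (c : Int) (cs : List Int) (m : Int) (tl : List Int)
    (hs : PySem.List.sorted ((c :: cs).map e) (fun x => x) false = m :: tl) :
    m = cs.foldl (fun b v => min b (e v)) (e c) := by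
  obtain ⟨hmem, hle, hall⟩ := pvFoldMin_spec e cs (e c)
  set r := cs.foldl (fun b v => min b (e v)) (e c) with hr
  have hmall : ∀ y ∈ (c :: cs).map e, m ≤ y :=
    PySem.List.key_head_sorted_le _ (fun x => x) hs
  have hm_mem : m ∈ (c :: cs).map e := by
    have : m ∈ PySem.List.sorted ((c :: cs).map e) (fun x => x) false := by
      rw [hs]; exact List.mem_cons_self
    exact (PySem.List.mem_sorted _ _ _ _).mp this
  have h1 : m ≤ r := by
    rcases hmem with h | h
    · rw [h]; exact hmall (e c) (by simp)
    · exact hmall r (by rw [List.map_cons]; exact List.mem_cons_of_mem _ h)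
  have h2 : r ≤ m := by
    rw [List.map_cons, List.mem_cons] at hm_mem
    rcases hm_mem with rfl | hm_mem
    · exact hle
    · obtain ⟨v, hv, rfl⟩ := List.mem_map.mp hm_mem
      exact hall v hv
  omega

-- ---- generic fold-of-conditional-set characterisation (the body of one round) ----
theorem pvFoldSet_getD {α : Type} (C : Nat → Bool) (g : Nat → α) :
    ∀ (L : List Nat), L.Nodup → ∀ (val : List (Option α)) (u : Nat),
    (L.foldl (fun val u => if C u then val.set u (some (g u)) else val) val).getD u none
      = if u ∈ L ∧ C u = true ∧ u < val.length then some (g u) else val.getD u none := by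
  intro L
  induction L with
  | nil => intro _ val u; simp
  | cons a L ih =>
    intro hnd val u
    rw [List.foldl_cons]
    have hnd' := (List.nodup_cons.mp hnd).2
    have hanotin := (List.nodup_cons.mp hnd).1
    by_cases hCa : C a = true
    · rw [if_pos hCa, ih hnd']
      rw [List.length_set]
      by_cases hu : u = a
      · subst hu
        have hnotL : u ∉ L := hanotin
        rw [if_neg (by tauto)]
        by_cases hlt : u < val.length
        · rw [if_pos ⟨by simp, hCa, hlt⟩, List.getD_eq_getElem?_getD,
            List.getElem?_set_self hlt, Option.getD_some]
        · rw [if_neg (by tauto), List.set_eq_of_length_le (by omega)]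
      · rw [List.getD_eq_getElem?_getD (l := val.set a _), List.getElem?_set_ne (fun h => hu h.symm),
          ← List.getD_eq_getElem?_getD]
        by_cases hmem : u ∈ L ∧ C u = true ∧ u < val.length
        · rw [if_pos hmem, if_pos ⟨by simp [hmem.1], hmem.2⟩]
        · rw [if_neg hmem, if_neg (by
            rintro ⟨h1, h2, h3⟩
            rcases List.mem_cons.mp h1 with h | h
            · exact hu h
            · exact hmem ⟨h, h2, h3⟩)]
    · rw [if_neg hCa, ih hnd']
      by_cases hmem : u ∈ L ∧ C u = true ∧ u < val.length
      · rw [if_pos hmem, if_pos ⟨by simp [hmem.1], hmem.2⟩]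
      · rw [if_neg hmem, if_neg (by
          rintro ⟨h1, h2, h3⟩
          rcases List.mem_cons.mp h1 with h | h
          · subst h; exact (by simp [hCa] at h2)
          · exact hmem ⟨h, h2, h3⟩)]

theorem pvFoldSet_length {α : Type} (C : Nat → Bool) (g : Nat → α) (L : List Nat) :
    ∀ val : List (Option α),
    (L.foldl (fun val u => if C u then val.set u (some (g u)) else val) val).length = val.length := by
  induction L with
  | nil => intro val; rfl
  | cons a L ih =>
    intro val
    rw [List.foldl_cons]
    by_cases h : C a = true
    · rw [if_pos h, ih, List.length_set]
    · rw [if_neg h, ih]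

-- one round, characterised pointwise
theorem pvBStep_getD (n : Nat) (kids : List (List Int)) (fv : List Int)
    (cur : List (Option (Int × Int))) (u : Nat) :
    (pvBStep n kids fv cur).getD u none
      = if u < n + 1 ∧ ((cur.getD u none).isNone
            && (kids.getD u []).all (fun v => (cur.getD v.toNat none).isSome)) = true
            ∧ u < cur.length
        then some (pvBNew fv cur (kids.getD u []) u)
        else cur.getD u none := by
  unfold pvBStep
  rw [pvFoldSet_getD _ _ (List.range (n+1)) List.nodup_range cur u]
  simp [List.mem_range]

theorem pvBStep_length (n : Nat) (kids : List (List Int)) (fv : List Int)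
    (cur : List (Option (Int × Int))) : (pvBStep n kids fv cur).length = cur.length := by
  unfold pvBStep
  exact pvFoldSet_length _ _ _ cur

-- an entry once set keeps its value through further rounds
theorem pvBStep_persist {n : Nat} {kids : List (List Int)} {fv : List Int}
    {cur : List (Option (Int × Int))} {u : Nat} {p : Int × Int}
    (h : cur.getD u none = some p) : (pvBStep n kids fv cur).getD u none = some p := by
  rw [pvBStep_getD]
  split
  · next hc =>
    exfalso
    obtain ⟨-, h2, -⟩ := hc
    rw [Bool.and_eq_true] at h2
    obtain ⟨h2a, -⟩ := h2
    rw [h] at h2a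
    simp at h2a
  · exact h

-- ---- the soundness invariant: every resolved entry is A's dfs value at every fuel ≥ round ----
def pvGoodAt (F P : List Int) (k : Nat) (t : List (Option (Int × Int))) : Prop :=
  t.length = F.length + 1 ∧
  ∀ u : Nat, u ≤ F.length → ∀ p : Int × Int, t.getD u none = some p →
    ∀ m : Nat, k ≤ m →
      pvAdfs (pvAChildren ((-1 : Int) :: P)) ((0 : Int) :: F) m (u : Int) = p

theorem pvGoodAt_mono {F P : List Int} {k k' : Nat} {t : List (Option (Int × Int))}
    (h : pvGoodAt F P k t) (hk : k ≤ k') : pvGoodAt F P k' t :=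
  ⟨h.1, fun u hu p hp m hm => h.2 u hu p hp m (le_trans hk hm)⟩

-- resolving a node from resolved children produces exactly A's dfs value at that node
theorem pvBStep_good {F P : List Int} (hpre : P.length ≤ F.length) {k : Nat}
    {t : List (Option (Int × Int))} (hg : pvGoodAt F P k t) :
    pvGoodAt F P (k+1) (pvBStep F.length (pvBKids F.length P) ((0 : Int) :: F) t) := by
  obtain ⟨hlen, hinv⟩ := hg
  refine ⟨by rw [pvBStep_length, hlen], ?_⟩
  intro u hu p hp m hm
  rw [pvBStep_getD] at hp
  by_cases hcond : u < F.length + 1 ∧ (((t.getD u none).isNone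
      && ((pvBKids F.length P).getD u []).all (fun v => (t.getD v.toNat none).isSome)) = true)
      ∧ u < t.length
  · rw [if_pos hcond] at hp
    obtain ⟨-, hC, -⟩ := hcond
    rw [Bool.and_eq_true] at hC
    obtain ⟨hnone, hall⟩ := hC
    rw [pvBKids_getD F.length P u hu] at hp hall
    rw [List.all_eq_true] at hall
    replace hp := Option.some.inj hp
    -- unfold one level of A's dfs at fuel m = m'+1
    obtain ⟨m', rfl⟩ : ∃ m', m = m' + 1 := ⟨m - 1, by omega⟩
    have hm' : k ≤ m' := by omega
    have hchA : (pvAChildren ((-1 : Int) :: P)).getD (u : Int) [] = pvOcc P (u : Int) :=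
      pvAChildren_getD P (u : Int) (by positivity)
    simp only [pvAdfs, hchA]
    -- each child is resolved with exactly its dfs value at fuel m'
    have hchild : ∀ v ∈ pvOcc P (u : Int),
        (t.getD v.toNat none).getD (0, 0)
          = pvAdfs (pvAChildren ((-1 : Int) :: P)) ((0 : Int) :: F) m' v := by
      intro v hv
      obtain ⟨hv1, hv2⟩ := pvOcc_mem hv
      have hvn : v.toNat ≤ F.length := by omega
      have hsome : (t.getD v.toNat none).isSome = true := by simpa using hall v hv
      obtain ⟨pv, hpv⟩ : ∃ pv, t.getD v.toNat none = some pv := by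
        cases h' : t.getD v.toNat none with
        | none => rw [h'] at hsome; simp at hsome
        | some pv => exact ⟨pv, rfl⟩
      rw [hpv, Option.getD_some, show v = ((v.toNat : Nat) : Int) by omega]
      exact (hinv v.toNat hvn pv hpv m' hm').symm
    cases hcc : pvOcc P (u : Int) with
    | nil =>
      rw [hcc] at hp
      simp only [pvBNew] at hp
      simp only [List.length_nil, if_pos]
      rw [← hp]
      have h1 : PySem.List.pyGet? ((0 : Int) :: F) (u : Int) = some (((0 : Int) :: F)[u]'(by simp; omega)) := by
        rw [PySem.List.pyGet?_natCast]
        exact List.getElem?_eq_getElem (by simp; omega)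
      have h2 : ((0 : Int) :: F).getD u 0 = ((0 : Int) :: F)[u]'(by simp; omega) :=
        List.getD_eq_getElem _ _ (by simp; omega)
      rw [h1, Option.getD_some, h2]
    | cons c rest =>
      rw [hcc] at hp hchild
      have hlen0 : ¬ (c :: rest).length = 0 := by simp
      rw [if_neg hlen0]
      -- A's loop over the children
      rw [show (fun (acc : Int × List Int) v =>
            let ef := pvAdfs (pvAChildren ((-1 : Int) :: P)) ((0 : Int) :: F) m' v
            (acc.1 + ef.2, acc.2 ++ [ef.1]))
          = (fun (acc : Int × List Int) v =>
            (acc.1 + (pvAdfs (pvAChildren ((-1 : Int) :: P)) ((0 : Int) :: F) m' v).2,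
             acc.2 ++ [(pvAdfs (pvAChildren ((-1 : Int) :: P)) ((0 : Int) :: F) m' v).1])) from rfl,
        pvFoldA_spec]
      set eA := fun v => (pvAdfs (pvAChildren ((-1 : Int) :: P)) ((0 : Int) :: F) m' v).1 with heA
      set fA := fun v => (pvAdfs (pvAChildren ((-1 : Int) :: P)) ((0 : Int) :: F) m' v).2 with hfA
      dsimp only
      simp only [List.nil_append, zero_add]
      obtain ⟨m0, tl, hs⟩ : ∃ m0 tl, PySem.List.sorted ((c :: rest).map eA) (fun x => x) false
          = m0 :: tl := by
        cases h' : PySem.List.sorted ((c :: rest).map eA) (fun x => x) false with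
        | nil => rw [PySem.List.sorted_eq_nil_iff] at h'; simp at h'
        | cons m0 tl => exact ⟨m0, tl, rfl⟩
      rw [hs]
      simp only [PySem.List.pyGet?_zero_cons, Option.getD_some, List.set_cons_zero,
        List.drop_succ_cons, List.drop_zero]
      have hm0 : m0 = rest.foldl (fun b v => min b (eA v)) (eA c) := pvSortedHead_eq eA c rest m0 tl hs
      have hperm := PySem.List.sorted_perm ((c :: rest).map eA) (fun x => x) false
      rw [hs] at hperm
      have hsum := hperm.sum_eq
      simp only [List.sum_cons, List.map_cons] at hsum
      -- B's pvBNew over the same children values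
      simp only [pvBNew] at hp
      have hgB : ∀ v ∈ (c :: rest),
          ((t.getD v.toNat none).getD (0, 0)) = (eA v, fA v) := by
        intro v hv
        rw [hchild v hv]
      have hBmin : rest.foldl (fun b v => min b (((t.getD v.toNat none).getD (0, 0)).1)) (((t.getD c.toNat none).getD (0, 0)).1)
          = rest.foldl (fun b v => min b (eA v)) (eA c) := by
        rw [hgB c (by simp)]
        exact PySem.List.foldl_congr_mem _ _ _ _ (fun acc v hv => by rw [hgB v (by simp [hv])])
      have hBsum : (c :: rest).foldl (fun a v => a + ((t.getD v.toNat none).getD (0, 0)).1 + ((t.getD v.toNat none).getD (0, 0)).2) 0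
          = ((c :: rest).map eA).sum + ((c :: rest).map fA).sum := by
        rw [PySem.List.foldl_congr_mem _ _
          (fun (a : Int) v => a + eA v + fA v) _
          (fun acc v hv => by rw [hgB v hv]), pvFoldB_sum]
        ring
      rw [hBmin, hBsum] at hp
      -- the two pairs agree componentwise
      have hfv : ((0 : Int) :: F).getD u 0 = (PySem.List.pyGet? ((0 : Int) :: F) (u : Int)).getD 0 := by
        have h1 : PySem.List.pyGet? ((0 : Int) :: F) (u : Int)
            = some (((0 : Int) :: F)[u]'(by simp; omega)) := by
          rw [PySem.List.pyGet?_natCast]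
          exact List.getElem?_eq_getElem (by simp; omega)
        rw [h1, Option.getD_some, List.getD_eq_getElem _ _ (by simp; omega)]
      rw [← hm0] at hp
      have htl : tl.sum = (eA c + (rest.map eA).sum) - m0 := by
        omega
      rw [← hp, hfv, Prod.mk.injEq]
      refine ⟨rfl, ?_⟩
      rw [htl]
      simp only [List.map_cons, List.sum_cons]
      ring
  · rw [if_neg hcond] at hp
    exact hinv u hu p hp m (by omega)

-- the invariant holds through the whole (early-exiting) loop
theorem pvBRounds_good {F P : List Int} (hpre : P.length ≤ F.length) :
    ∀ (k j : Nat) (t : List (Option (Int × Int))), pvGoodAt F P j t →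
    pvGoodAt F P (j + k) (pvBRounds F.length (pvBKids F.length P) ((0 : Int) :: F) k t) := by
  intro k
  induction k with
  | zero => intro j t h; simpa using h
  | succ k ih =>
    intro j t h
    rw [pvBRounds]
    by_cases hb : (t.getD 0 none).isSome = true
    · rw [if_pos hb]; exact pvGoodAt_mono h (by omega)
    · rw [if_neg hb]
      have := ih (j + 1) _ (pvBStep_good hpre h)
      exact pvGoodAt_mono this (by omega)

-- ---- the break-free iteration of rounds, used to reason about progress ----
def pvPlain (n : Nat) (kids : List (List Int)) (fv : List Int) :
    Nat → List (Option (Int × Int)) → List (Option (Int × Int))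
  | 0, t => t
  | k+1, t => pvPlain n kids fv k (pvBStep n kids fv t)

theorem pvPlain_succ (n : Nat) (kids : List (List Int)) (fv : List Int) (k : Nat) :
    ∀ t, pvPlain n kids fv (k+1) t = pvBStep n kids fv (pvPlain n kids fv k t) := by
  induction k with
  | zero => intro t; rfl
  | succ k ih =>
    intro t
    rw [pvPlain, ih, pvPlain]

theorem pvPlain_length (n : Nat) (kids : List (List Int)) (fv : List Int) (k : Nat) :
    ∀ t, (pvPlain n kids fv k t).length = t.length := by
  induction k with
  | zero => intro t; rfl
  | succ k ih => intro t; rw [pvPlain, ih, pvBStep_length]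

theorem pvPlain_add (n : Nat) (kids : List (List Int)) (fv : List Int) (a b : Nat) (t : List (Option (Int × Int))) :
    pvPlain n kids fv (a + b) t = pvPlain n kids fv b (pvPlain n kids fv a t) := by
  induction b with
  | zero => rfl
  | succ b ih => rw [show a + (b+1) = (a+b) + 1 by omega, pvPlain_succ, ih, pvPlain_succ]

theorem pvPlain_persist (n : Nat) (kids : List (List Int)) (fv : List Int) (k : Nat) :
    ∀ t (u : Nat) (p : Int × Int), t.getD u none = some p →
    (pvPlain n kids fv k t).getD u none = some p := by
  induction k with
  | zero => intro t u p h; exact h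
  | succ k ih =>
    intro t u p h
    rw [pvPlain]
    exact ih _ u p (pvBStep_persist h)

theorem pvPlain_good {F P : List Int} (hpre : P.length ≤ F.length) (k : Nat) :
    ∀ (j : Nat) (t : List (Option (Int × Int))), pvGoodAt F P j t →
    pvGoodAt F P (j + k) (pvPlain F.length (pvBKids F.length P) ((0 : Int) :: F) k t) := by
  induction k with
  | zero => intro j t h; simpa using h
  | succ k ih =>
    intro j t h
    rw [pvPlain]
    have := ih (j + 1) _ (pvBStep_good hpre h)
    exact pvGoodAt_mono this (by omega)

-- the break loop equals the plain iteration as long as the root is unresolved at the end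
theorem pvBRounds_eq_plain (n : Nat) (kids : List (List Int)) (fv : List Int) (k : Nat) :
    ∀ t, (pvBRounds n kids fv k t).getD 0 none = none →
    pvBRounds n kids fv k t = pvPlain n kids fv k t := by
  induction k with
  | zero => intro t _; rfl
  | succ k ih =>
    intro t h
    rw [pvBRounds] at h ⊢
    by_cases hb : (t.getD 0 none).isSome = true
    · rw [if_pos hb] at h
      rw [Option.isSome_iff_exists] at hb
      obtain ⟨p, hp⟩ := hb
      rw [h] at hp
      exact absurd hp (by simp)
    · rw [if_neg hb] at h ⊢
      rw [pvPlain, ih _ h]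

-- ---- progress: an unresolved node yields a chain of unresolved descendants ----
theorem pvUnset_chain {F P : List Int} (hpre : P.length ≤ F.length) :
    ∀ (k : Nat) (u : Nat), u ≤ F.length →
    (pvPlain F.length (pvBKids F.length P) ((0 : Int) :: F) k
        (List.replicate (F.length + 1) none)).getD u none = none →
    ∃ l : List Int, l.length = k ∧ List.IsChain (fun a b => b ∈ pvOcc P a) ((u : Int) :: l) ∧
      ∀ x ∈ l, 1 ≤ x ∧ x ≤ (P.length : Int) := by
  intro k
  induction k with
  | zero =>
    intro u _ _
    exact ⟨[], rfl, by simp, by simp⟩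
  | succ k ih =>
    intro u hu hnone
    rw [pvPlain_succ] at hnone
    set T := pvPlain F.length (pvBKids F.length P) ((0 : Int) :: F) k
      (List.replicate (F.length + 1) none) with hT
    have hTlen : T.length = F.length + 1 := by rw [hT, pvPlain_length]; simp
    rw [pvBStep_getD] at hnone
    by_cases hc : u < F.length + 1 ∧ (((T.getD u none).isNone
        && ((pvBKids F.length P).getD u []).all (fun v => (T.getD v.toNat none).isSome)) = true)
        ∧ u < T.length
    · rw [if_pos hc] at hnone; exact absurd hnone (by simp)
    · rw [if_neg hc] at hnone
      -- hnone : T.getD u none = none; so some child of u is unresolved in T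
      have hex : ∃ v ∈ pvOcc P (u : Int), T.getD v.toNat none = none := by
        by_contra hno
        push Not at hno
        refine hc ⟨by omega, ?_, by omega⟩
        rw [Bool.and_eq_true]
        refine ⟨by rw [hnone]; rfl, ?_⟩
        rw [pvBKids_getD F.length P u hu, List.all_eq_true]
        intro v hv
        cases h' : T.getD v.toNat none with
        | none => exact absurd h' (hno v hv)
        | some _ => rfl
      obtain ⟨v, hv, hvnone⟩ := hex
      obtain ⟨hv1, hv2⟩ := pvOcc_mem hv
      have hvn : v.toNat ≤ F.length := by omega
      obtain ⟨l', hl'len, hl'ch, hl'b⟩ := ih v.toNat hvn hvnone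
      rw [show ((v.toNat : Nat) : Int) = v by omega] at hl'ch
      refine ⟨v :: l', by simp [hl'len], ?_, ?_⟩
      · exact List.isChain_cons_cons.mpr ⟨hv, hl'ch⟩
      · intro x hx
        rcases List.mem_cons.mp hx with rfl | hx
        · exact ⟨hv1, hv2⟩
        · exact hl'b x hx

-- ---- no chain from the root can have more than |P| further nodes (parents are unique) ----
-- descending a duplicated pair of chain positions to the root gives 0 ∈ {1, …, |P|}
theorem pvNoChain_aux (P : List Int) (l : List Int) (hlen : l.length = P.length + 1)
    (hch : List.IsChain (fun a b => b ∈ pvOcc P a) ((0 : Int) :: l))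
    (hb : ∀ x ∈ l, 1 ≤ x ∧ x ≤ (P.length : Int))
    (i j : Nat) (_hi : i < l.length) (hj : j < l.length) (hlt : i < j)
    (heq : l.getD i 0 = l.getD j 0) : False := by
  have hstep : ∀ a, a + 1 < ((0 : Int) :: l).length →
      ((0 : Int) :: l).getD (a+1) 0 ∈ pvOcc P (((0 : Int) :: l).getD a 0) := by
    intro a h
    have h2 := hch.getElem a h
    have e1 : ((0 : Int) :: l).getD (a+1) 0 = ((0 : Int) :: l)[a+1]'h :=
      List.getD_eq_getElem _ _ h
    have e2 : ((0 : Int) :: l).getD a 0 = ((0 : Int) :: l)[a]'(by omega) :=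
      List.getD_eq_getElem _ _ (by omega)
    rw [e1, e2]
    exact h2
  have key : ∀ d, d ≤ i + 1 →
      ((0 : Int) :: l).getD (i+1-d) 0 = ((0 : Int) :: l).getD (j+1-d) 0 := by
    intro d
    induction d with
    | zero =>
      intro _
      simpa using heq
    | succ d ihd =>
      intro hd
      have hprev := ihd (by omega)
      rw [show i + 1 - d = (i - d) + 1 by omega, show j + 1 - d = (j - d) + 1 by omega] at hprev
      have m1 := hstep (i - d) (by simp only [List.length_cons]; omega)
      have m2 := hstep (j - d) (by simp only [List.length_cons]; omega)
      rw [hprev] at m1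
      have hpar := pvOcc_parent_unique m1 m2
      rw [show i + 1 - (d+1) = i - d by omega, show j + 1 - (d+1) = j - d by omega]
      exact hpar
  have h0 := key (i+1) (le_refl _)
  rw [show i + 1 - (i+1) = 0 by omega, show j + 1 - (i+1) = (j-i-1) + 1 by omega] at h0
  simp only [List.getD_cons_zero, List.getD_cons_succ] at h0
  have e : l.getD (j-i-1) 0 = l[j-i-1]'(by omega) := List.getD_eq_getElem _ _ (by omega)
  rw [e] at h0
  have hbb := hb (l[j-i-1]'(by omega)) (List.getElem_mem _)
  omega

theorem pvNoChain (P : List Int) (l : List Int) (hlen : l.length = P.length + 1)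
    (hch : List.IsChain (fun a b => b ∈ pvOcc P a) ((0 : Int) :: l))
    (hb : ∀ x ∈ l, 1 ≤ x ∧ x ≤ (P.length : Int)) : False := by
  have hval : ∀ a : Fin (P.length + 1),
      1 ≤ l.getD (a : Nat) 0 ∧ l.getD (a : Nat) 0 ≤ (P.length : Int) := by
    intro a
    have ha : (a : Nat) < l.length := by omega
    rw [List.getD_eq_getElem _ _ ha]
    exact hb _ (List.getElem_mem _)
  obtain ⟨i, j, hij, heq⟩ := Fintype.exists_ne_map_eq_of_card_lt
    (fun a : Fin (P.length + 1) =>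
      (⟨(l.getD (a : Nat) 0 - 1).toNat, by have := hval a; omega⟩ : Fin P.length))
    (by simp)
  have hEq : l.getD (i : Nat) 0 = l.getD (j : Nat) 0 := by
    have h1 := hval i
    have h2 := hval j
    have h3 := congrArg Fin.val heq
    simp only at h3
    omega
  have hne : (i : Nat) ≠ (j : Nat) := fun h => hij (Fin.ext h)
  rcases Nat.lt_or_ge (i : Nat) (j : Nat) with hlt | hge
  · exact pvNoChain_aux P l hlen hch hb i j (by omega) (by omega) hlt hEq
  · exact pvNoChain_aux P l hlen hch hb j i (by omega) (by omega) (by omega) hEq.symm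

-- ===== VERDICT (by name: the statement is the Claim_ definition above) =====
theorem ans_dfs_oneval_spec : Claim_equal_ans_dfs_oneval := by
  intro F P _ hpre
  have hple : P.length ≤ F.length := hpre
  unfold Spec_ans_dfs_oneval ans_dfs_oneval ans_dfs_oneval_alt
  dsimp only
  have hg0 : pvGoodAt F P 0 (List.replicate (F.length + 1) (none : Option (Int × Int))) := by
    refine ⟨by simp, ?_⟩
    intro u hu p hp m _
    exfalso
    have hrep : (List.replicate (F.length + 1) (none : Option (Int × Int))).getD u none = none := by
      rw [List.getD_eq_getElem?_getD, List.getElem?_replicate]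
      split <;> rfl
    rw [hrep] at hp
    exact absurd hp (by simp)
  -- the plain iteration resolves the root within |P|+1 rounds
  set T := pvPlain F.length (pvBKids F.length P) ((0 : Int) :: F) (P.length + 1)
    (List.replicate (F.length + 1) none) with hTdef
  have hT0 : T.getD 0 none ≠ none := by
    intro h
    obtain ⟨l, hlen, hch, hb⟩ := pvUnset_chain hpre (P.length + 1) 0 (by omega) h
    exact pvNoChain P l hlen (by simpa using hch) hb
  obtain ⟨p, hp⟩ : ∃ p, T.getD 0 none = some p := by
    cases h : T.getD 0 none with
    | none => exact absurd h hT0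
    | some p => exact ⟨p, rfl⟩
  have hTgood : pvGoodAt F P (0 + (P.length + 1)) T :=
    pvPlain_good hpre (P.length + 1) 0 _ hg0
  have hpA : ∀ m, P.length + 1 ≤ m →
      pvAdfs (pvAChildren ((-1 : Int) :: P)) ((0 : Int) :: F) m 0 = p := by
    intro m hm
    have := hTgood.2 0 (by omega) p hp m (by omega)
    simpa using this
  have hfingood : pvGoodAt F P (0 + (F.length + 1))
      (pvBRounds F.length (pvBKids F.length P) ((0 : Int) :: F) (F.length + 1)
        (List.replicate (F.length + 1) none)) :=
    pvBRounds_good hpre (F.length + 1) 0 _ hg0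
  cases hfin : (pvBRounds F.length (pvBKids F.length P) ((0 : Int) :: F) (F.length + 1)
      (List.replicate (F.length + 1) none)).getD 0 none with
  | some q =>
    have hqA : pvAdfs (pvAChildren ((-1 : Int) :: P)) ((0 : Int) :: F)
        (F.length + P.length + 2) 0 = q := by
      have := hfingood.2 0 (by omega) q hfin (F.length + P.length + 2) (by omega)
      simpa using this
    have hpq : p = q := by
      rw [hpA (F.length + P.length + 2) (by omega)] at hqA
      exact hqA
    rw [hpA (P.length + 2) (by omega), hpq]
  | none =>
    exfalso
    have heqp : pvBRounds F.length (pvBKids F.length P) ((0 : Int) :: F) (F.length + 1)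
        (List.replicate (F.length + 1) none)
        = pvPlain F.length (pvBKids F.length P) ((0 : Int) :: F) (F.length + 1)
          (List.replicate (F.length + 1) none) :=
      pvBRounds_eq_plain _ _ _ _ _ hfin
    obtain ⟨d, hd⟩ : ∃ d, F.length + 1 = (P.length + 1) + d := ⟨F.length - P.length, by omega⟩
    have hsplit := pvPlain_add F.length (pvBKids F.length P) ((0 : Int) :: F)
      (P.length + 1) d (List.replicate (F.length + 1) none)
    rw [← hd] at hsplit
    have hpers := pvPlain_persist F.length (pvBKids F.length P) ((0 : Int) :: F) d T 0 p hp
    rw [← hsplit, ← heqp, hfin] at hpers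
    exact absurd hpers (by simp)
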